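-- pv_equiv track=rewrite | github.com/wangers/subtools2 | egrecho/utils/cuda_utils.py | _transform_uuid_to_ordinals
-- ===== SOURCE A (Python) =====
-- from typing import Any, Dict, List, Optional, Sequence, Tuple, Union, cast
--
-- def _transform_uuid_to_ordinals(
--     candidates: List[str], uuids: List[str]
-- ) -> List[int]:
--     """Given the set of partial uuids and list of known uuids builds
--     a set of ordinals excluding ambiguous partials IDs"""
--
--     def uuid_to_orinal(candidate: str, uuids: List[str]) -> int:
--         best_match = -1
--         for idx, uuid in enumerate(uuids):
--             if not uuid.startswith(candidate):
--                 continue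
--             # Ambiguous candidate
--             if best_match != -1:
--                 return -1
--             best_match = idx
--         return best_match
--
--     rc: List[int] = []
--     for candidate in candidates:
--         idx = uuid_to_orinal(candidate, uuids)
--         # First invalid ordinal stops parsing
--         if idx < 0:
--             break
--         # Duplicates result in empty set
--         if idx in rc:
--             return cast(List[int], [])
--         rc.append(idx)
--     return rc
-- ===== SOURCE B (Python) =====
-- from typing import List
--
--
-- def _bisect_left_str(keys: List[str], x: str) -> int:
--     lo, hi = 0, len(keys)
--     while lo < hi:
--         mid = (lo + hi) // 2
--         if keys[mid] < x:
--             lo = mid + 1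
--         else:
--             hi = mid
--     return lo
--
--
-- def _transform_uuid_to_ordinals(
--     candidates: List[str], uuids: List[str]
-- ) -> List[int]:
--     # Sort (ordinal, uuid) pairs by uuid once; the uuids having a given
--     # candidate as prefix form a contiguous run in that order, so one binary
--     # search per candidate finds it and looking at its first two entries
--     # decides no-match / unique / ambiguous.
--     pairs = sorted(enumerate(uuids), key=lambda p: p[1])
--     keys = [u for _, u in pairs]
--     n = len(keys)
--     rc: List[int] = []
--     seen = set()
--     for candidate in candidates:
--         lo = _bisect_left_str(keys, candidate)
--         if lo == n or not keys[lo].startswith(candidate):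
--             break  # no match
--         if lo + 1 < n and keys[lo + 1].startswith(candidate):
--             break  # ambiguous
--         idx = pairs[lo][0]
--         if idx in seen:
--             return []
--         seen.add(idx)
--         rc.append(idx)
--     return rc
-- ===== Notes on version B (the rewrite author's own statement) =====
-- stated objective: alternative
-- what changed: Instead of scanning all uuids for every candidate, B sorts (ordinal, uuid) pairs by uuid once and binary-searches each candidate; prefix matches are contiguous in sorted order, so inspecting the first two entries of the run decides no-match/unique/ambiguous, and a set replaces the linear duplicate scan over rc; the up-front sort trades away A's early-exit advantage on non-matching input, so it is not measurably faster on random data.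
import Mathlib
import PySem

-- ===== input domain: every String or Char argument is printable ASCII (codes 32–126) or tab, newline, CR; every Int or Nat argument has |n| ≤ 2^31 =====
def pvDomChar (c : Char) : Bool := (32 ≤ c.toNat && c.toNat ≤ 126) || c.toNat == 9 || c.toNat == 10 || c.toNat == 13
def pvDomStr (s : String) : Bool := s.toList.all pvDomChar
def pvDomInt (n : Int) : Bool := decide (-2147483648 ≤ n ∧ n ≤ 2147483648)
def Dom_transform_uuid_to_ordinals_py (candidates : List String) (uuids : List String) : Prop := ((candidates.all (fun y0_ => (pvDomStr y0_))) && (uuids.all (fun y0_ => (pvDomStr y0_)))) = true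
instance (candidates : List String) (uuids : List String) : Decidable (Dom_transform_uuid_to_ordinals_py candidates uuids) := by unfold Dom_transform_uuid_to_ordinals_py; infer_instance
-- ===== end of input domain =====

-- B replaces A's per-candidate linear scan of all uuids by one sort of (ordinal, uuid)
-- pairs plus a binary search per candidate (prefix matches are contiguous in sorted
-- order) and a set for the duplicate check; objective: alternative algorithm.

-- ===== PORT A =====
-- inner helper uuid_to_orinal: scan enumerate(uuids) keeping best_match, early -1 on ambiguity
def pvUuidToOrdinalLoop (candidate : String) : List (Int × String) → Int → Int
  | [], best => best
  | (i, u) :: rest, best =>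
    if PySem.Str.startswith u candidate = false then pvUuidToOrdinalLoop candidate rest best
    else if best ≠ -1 then -1
    else pvUuidToOrdinalLoop candidate rest i

def pvUuidToOrdinal (candidate : String) (uuids : List String) : Int :=
  pvUuidToOrdinalLoop candidate (PySem.List.enumerate uuids) (-1)

-- main loop: break on first invalid ordinal, return [] on a duplicate
def pvLoopA (uuids : List String) : List String → List Int → List Int
  | [], rc => rc
  | c :: rest, rc =>
    let idx := pvUuidToOrdinal c uuids
    if idx < 0 then rc
    else if rc.contains idx then []
    else pvLoopA uuids rest (rc ++ [idx])

def transform_uuid_to_ordinals_py (candidates : List String) (uuids : List String) : List Int :=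
  pvLoopA uuids candidates []

-- ===== PORT B =====
-- hand-written bisect_left (Source B's while loop; lo, hi stay nonnegative so Nat is exact)
def pvBisectLeftStr (keys : List String) (x : String) (lo hi : Nat) : Nat :=
  if lo < hi then
    if keys.getD ((lo + hi) / 2) "" < x then pvBisectLeftStr keys x ((lo + hi) / 2 + 1) hi
    else pvBisectLeftStr keys x lo ((lo + hi) / 2)
  else lo
termination_by hi - lo
decreasing_by all_goals omega

def pvLoopB (pairs : List (Int × String)) (keys : List String) (n : Nat) :
    List String → List Int → PySem.Set Int → List Int
  | [], rc, _ => rc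
  | c :: rest, rc, seen =>
    let lo := pvBisectLeftStr keys c 0 n
    if lo = n ∨ PySem.Str.startswith (keys.getD lo "") c = false then rc
    else if lo + 1 < n ∧ PySem.Str.startswith (keys.getD (lo + 1) "") c = true then rc
    else
      let idx := (pairs.getD lo (0, "")).1
      if PySem.Set.contains seen idx then []
      else pvLoopB pairs keys n rest (rc ++ [idx]) (PySem.Set.add seen idx)

def transform_uuid_to_ordinals_py_alt (candidates : List String) (uuids : List String) : List Int :=
  let pairs := PySem.List.sorted (PySem.List.enumerate uuids) (fun p => p.2)
  let keys := pairs.map (fun p => p.2)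
  pvLoopB pairs keys keys.length candidates [] PySem.Set.empty

-- ===== PRECONDITION & SPEC =====
def Spec_transform_uuid_to_ordinals_py (candidates : List String) (uuids : List String) (out : List Int) : Prop := out = transform_uuid_to_ordinals_py_alt candidates uuids
instance (candidates : List String) (uuids : List String) (out : List Int) : Decidable (Spec_transform_uuid_to_ordinals_py candidates uuids out) := by unfold Spec_transform_uuid_to_ordinals_py; infer_instance

-- ===== CLAIM (what is proved, stated in full; the proofs are below) =====
def Claim_equal_transform_uuid_to_ordinals_py : Prop := ∀ (candidates : List String) (uuids : List String), Dom_transform_uuid_to_ordinals_py candidates uuids → Spec_transform_uuid_to_ordinals_py candidates uuids (transform_uuid_to_ordinals_py candidates uuids)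

-- ===== LEMMAS AND PROOFS =====

-- a list is lexicographically ≤ any extension of itself
theorem pv_le_of_prefix {l m : List Char} (h : l <+: m) : l ≤ m := by
  obtain ⟨t, rfl⟩ := h
  have : ¬ (l ++ t < l) := by
    induction l with
    | nil => intro hc; cases hc
    | cons a l ih =>
      intro hc
      cases hc with
      | cons h' => exact ih h'
      | rel h' => exact lt_irrefl _ h'
  exact le_of_not_gt this

-- sandwich: any string between c and an extension of c also extends c
theorem pv_prefix_sandwich : ∀ (c u v : List Char), c ≤ u → u ≤ v → c <+: v → c <+: u := by
  intro c
  induction c with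
  | nil => intro u v _ _ _; exact List.nil_prefix
  | cons a c ih =>
    intro u v h1 h2 h3
    cases u with
    | nil =>
      have : ([] : List Char) < a :: c := List.Lex.nil
      exact absurd (lt_of_le_of_lt h1 this) (lt_irrefl _)
    | cons b u =>
      cases v with
      | nil => exact absurd (List.prefix_nil.mp h3) (by simp)
      | cons e v =>
        obtain ⟨rfl, h3'⟩ := List.cons_prefix_cons.mp h3
        rcases lt_trichotomy a b with hab | rfl | hba
        · exact absurd (show a :: v < b :: u from List.Lex.rel hab) (not_lt_of_ge h2)
        · have h1' : c ≤ u := le_of_not_gt (fun hc => (not_lt_of_ge h1) (List.Lex.cons hc))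
          have h2' : u ≤ v := le_of_not_gt (fun hc => (not_lt_of_ge h2) (List.Lex.cons hc))
          exact List.cons_prefix_cons.mpr ⟨rfl, ih u v h1' h2' h3'⟩
        · exact absurd (show b :: u < a :: c from List.Lex.rel hba) (not_lt_of_ge h1)

theorem pv_str_le_of_startswith {c u : String} (h : PySem.Str.startswith u c = true) : c ≤ u := by
  rw [String.le_iff_toList_le]
  apply pv_le_of_prefix
  rw [PySem.Str.startswith_eq] at h
  exact (PySem.Chars.startswith_iff _ _).mp h

theorem pv_str_sandwich {c u v : String} (h1 : c ≤ u) (h2 : u ≤ v)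
    (h3 : PySem.Str.startswith v c = true) : PySem.Str.startswith u c = true := by
  rw [PySem.Str.startswith_eq] at h3 ⊢
  rw [PySem.Chars.startswith_iff] at h3 ⊢
  exact pv_prefix_sandwich _ _ _ (String.le_iff_toList_le.mp h1) (String.le_iff_toList_le.mp h2) h3

-- monotone access on a sorted key list
theorem pv_getD_mono {keys : List String} (hs : keys.Pairwise (· ≤ ·))
    {p q : Nat} (hpq : p ≤ q) (hq : q < keys.length) :
    keys.getD p "" ≤ keys.getD q "" := by
  rw [List.getD_eq_getElem _ _ (lt_of_le_of_lt hpq hq), List.getD_eq_getElem _ _ hq]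
  rcases lt_or_eq_of_le hpq with h | h
  · exact (List.pairwise_iff_getElem.mp hs) p q _ _ h
  · subst h; exact le_refl _

-- binary-search invariant
theorem pv_bisect_spec (keys : List String) (x : String) (hs : keys.Pairwise (· ≤ ·)) :
    ∀ (k lo hi : Nat), hi - lo = k → lo ≤ hi → hi ≤ keys.length →
    (∀ j, j < lo → keys.getD j "" < x) →
    (∀ j, hi ≤ j → j < keys.length → x ≤ keys.getD j "") →
    lo ≤ pvBisectLeftStr keys x lo hi ∧ pvBisectLeftStr keys x lo hi ≤ hi ∧
    (∀ j, j < pvBisectLeftStr keys x lo hi → keys.getD j "" < x) ∧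
    (∀ j, pvBisectLeftStr keys x lo hi ≤ j → j < keys.length → x ≤ keys.getD j "") := by
  intro k
  induction k using Nat.strong_induction_on with
  | _ k IH =>
    intro lo hi hk hlohi hhi Hlo Hhi
    rw [pvBisectLeftStr]
    by_cases hlt : lo < hi
    · rw [if_pos hlt]
      have hmid1 : lo ≤ (lo + hi) / 2 := by omega
      have hmid2 : (lo + hi) / 2 < hi := by omega
      by_cases hc : keys.getD ((lo + hi) / 2) "" < x
      · rw [if_pos hc]
        have hrec := IH (hi - ((lo + hi) / 2 + 1)) (by omega) ((lo + hi) / 2 + 1) hi rfl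
          (by omega) hhi
          (fun j hj => by
            rcases Nat.lt_succ_iff_lt_or_eq.mp hj with hj' | hj'
            · rcases Nat.lt_or_ge j lo with h' | h'
              · exact Hlo j h'
              · exact lt_of_le_of_lt (pv_getD_mono hs (Nat.le_of_lt hj') (lt_of_lt_of_le hmid2 hhi)) hc
            · subst hj'; exact hc)
          Hhi
        exact ⟨by omega, hrec.2.1, hrec.2.2.1, hrec.2.2.2⟩
      · rw [if_neg hc]
        have hxm : x ≤ keys.getD ((lo + hi) / 2) "" := le_of_not_gt hc
        have hrec := IH ((lo + hi) / 2 - lo) (by omega) lo ((lo + hi) / 2) rfl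
          (by omega) (by omega) Hlo
          (fun j hj hjlen => le_trans hxm (pv_getD_mono hs hj hjlen))
        exact ⟨hrec.1, by omega, hrec.2.2.1, hrec.2.2.2⟩
    · rw [if_neg hlt]
      have : lo = hi := by omega
      exact ⟨le_refl _, by omega, Hlo, fun j hj hjl => Hhi j (by omega) hjl⟩

-- the value of A's inner scan as a function of the filtered match list
def pvOrdinalOf (best : Int) (l : List (Int × String)) : Int :=
  match l with
  | [] => best
  | [p] => if best = -1 then p.1 else -1
  | _ :: _ :: _ => -1

-- characterisation of A's inner scan
theorem pv_loopA_char (c : String) (l : List (Int × String)) (best : Int)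
    (hnn : ∀ p ∈ l, 0 ≤ p.1) :
    pvUuidToOrdinalLoop c l best =
      pvOrdinalOf best (l.filter (fun p => PySem.Str.startswith p.2 c)) := by
  induction l generalizing best with
  | nil => simp [pvUuidToOrdinalLoop, pvOrdinalOf]
  | cons hd t ih =>
    obtain ⟨i, u⟩ := hd
    have hnt : ∀ p ∈ t, 0 ≤ p.1 := fun p hp => hnn p (List.mem_cons_of_mem _ hp)
    by_cases hP : PySem.Str.startswith u c = true
    · have hi0 : (0:Int) ≤ i := hnn (i, u) List.mem_cons_self
      rw [List.filter_cons]
      simp only [hP, if_pos]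
      by_cases hb : best = -1
      · subst hb
        simp only [pvUuidToOrdinalLoop, hP, Bool.true_eq_false, ne_eq, not_true_eq_false, if_false]
        rw [ih i hnt]
        cases hft : t.filter (fun p => PySem.Str.startswith p.2 c) with
        | nil => simp [pvOrdinalOf]
        | cons q r =>
          cases r with
          | nil => simp [pvOrdinalOf, show i ≠ -1 by omega]
          | cons q' r' => simp [pvOrdinalOf]
      · simp only [pvUuidToOrdinalLoop, hP, Bool.true_eq_false, if_neg, ne_eq, hb,
          not_false_eq_true, if_true]
        cases hft : t.filter (fun p => PySem.Str.startswith p.2 c) with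
        | nil => simp [pvOrdinalOf, hb]
        | cons q r => cases r <;> simp [pvOrdinalOf]
    · have hP' : PySem.Str.startswith u c = false := by
        cases h : PySem.Str.startswith u c
        · rfl
        · exact absurd h hP
      rw [List.filter_cons]
      simp only [hP', Bool.false_eq_true, if_false]
      simp only [pvUuidToOrdinalLoop, hP', if_pos]
      exact ih best hnt

-- ===== main equivalence =====
theorem pv_main (uuids : List String) (cands : List String) (rc : List Int) :
    pvLoopA uuids cands rc =
      pvLoopB (PySem.List.sorted (PySem.List.enumerate uuids) (fun p => p.2))
        ((PySem.List.sorted (PySem.List.enumerate uuids) (fun p => p.2)).map (fun p => p.2))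
        ((PySem.List.sorted (PySem.List.enumerate uuids) (fun p => p.2)).map (fun p => p.2)).length
        cands rc rc := by
  set E := PySem.List.enumerate uuids with hE
  set pairs := PySem.List.sorted E (fun p => p.2) with hpairs
  set keys := pairs.map (fun p => p.2) with hkeys
  set n := keys.length with hn
  have hperm : pairs.Perm E := PySem.List.sorted_perm E (fun p => p.2) false
  have hs : keys.Pairwise (· ≤ ·) := by
    rw [hkeys, List.pairwise_map]
    exact PySem.List.sorted_pairwise E (fun p => p.2)
  have hnodupE : E.Nodup := by
    apply List.Pairwise.imp _ (PySem.List.pairwise_lt_enumerate uuids 0)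
    intro p q h he
    exact absurd (congrArg Prod.fst he) (ne_of_lt h)
  have hnodup : pairs.Nodup := hperm.nodup_iff.mpr hnodupE
  have hlen : pairs.length = n := by rw [hn, hkeys, List.length_map]
  have hE0 : ∀ p ∈ E, (0:Int) ≤ p.1 := by
    intro p hp
    obtain ⟨k, hk, rfl⟩ := (PySem.List.mem_enumerate_iff uuids 0 p).mp hp
    simp
  have keysj : ∀ j, j < n → keys.getD j "" = (pairs.getD j (0, "")).2 := by
    intro j hj
    have hj1 : j < keys.length := by omega
    have hj2 : j < pairs.length := by omega
    rw [List.getD_eq_getElem _ _ hj1, List.getD_eq_getElem _ _ hj2]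
    simp only [hkeys, List.getElem_map]
  have hgdmem : ∀ j, j < n → pairs.getD j (0, "") ∈ pairs := by
    intro j hj
    rw [List.getD_eq_getElem _ _ (by omega : j < pairs.length)]
    exact List.getElem_mem _
  induction cands generalizing rc with
  | nil => simp [pvLoopA, pvLoopB]
  | cons c rest ih =>
    -- the two filtered match lists
    set P : Int × String → Bool := fun p => PySem.Str.startswith p.2 c with hP
    set m := E.filter P with hm
    set f := pairs.filter P with hf
    have hpf : f.Perm m := hperm.filter P
    -- bisect facts
    set lo := pvBisectLeftStr keys c 0 n with hlo
    have hspec := pv_bisect_spec keys c hs n 0 n rfl (Nat.zero_le _) (le_of_eq hn)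
      (fun j hj => absurd hj (Nat.not_lt_zero j))
      (fun j hj hjl => absurd (lt_of_lt_of_le hjl (le_of_eq hn.symm)) (Nat.not_lt.mpr hj))
    obtain ⟨-, hloN, hbelow, habove⟩ := hspec
    -- every matching position is ≥ lo
    have HgeS : ∀ j, j < n → PySem.Str.startswith (keys.getD j "") c = true → lo ≤ j := by
      intro j hj hmatch
      by_contra hcon
      have h1 := hbelow j (by omega)
      have h2 := pv_str_le_of_startswith (c := c) (u := keys.getD j "") hmatch
      exact absurd h1 (not_lt_of_ge h2)
    -- a matching pair sits at some position ≥ lo that matches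
    have Hpos : ∀ p, p ∈ f → ∃ j, j < n ∧ lo ≤ j ∧ pairs.getD j (0, "") = p ∧
        PySem.Str.startswith (keys.getD j "") c = true := by
      intro p hpmem
      have hpp : p ∈ pairs ∧ P p = true := List.mem_filter.mp hpmem
      obtain ⟨j, hjl, hje⟩ := List.getElem_of_mem hpp.1
      have hjn : j < n := by omega
      have hgd : pairs.getD j (0, "") = p := by
        rw [List.getD_eq_getElem _ _ hjl]; exact hje
      have hPj : PySem.Str.startswith (keys.getD j "") c = true := by
        rw [keysj j hjn, hgd]; exact hpp.2
      exact ⟨j, hjn, HgeS j hjn hPj, hgd, hPj⟩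
    -- if some match exists, position lo matches
    have Hlo_match : f ≠ [] → lo < n ∧ PySem.Str.startswith (keys.getD lo "") c = true := by
      intro hne
      obtain ⟨p, hpmem⟩ := List.exists_mem_of_ne_nil f hne
      obtain ⟨j, hjn, hloj, -, hPj⟩ := Hpos p hpmem
      have hlon : lo < n := lt_of_le_of_lt hloj hjn
      refine ⟨hlon, ?_⟩
      exact pv_str_sandwich (habove lo (le_refl _) (by omega))
        (pv_getD_mono hs hloj (by omega)) hPj
    -- a second match beyond lo forces a match at lo+1
    have Hsecond : ∀ j, j < n → lo < j → PySem.Str.startswith (keys.getD j "") c = true →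
        lo + 1 < n ∧ PySem.Str.startswith (keys.getD (lo + 1) "") c = true := by
      intro j hj hltj hPj
      refine ⟨by omega, ?_⟩
      exact pv_str_sandwich (habove (lo + 1) (by omega) (by omega))
        (pv_getD_mono hs (by omega) (by omega)) hPj
    -- A's ordinal
    have hA : pvUuidToOrdinal c uuids = pvOrdinalOf (-1) m := by
      have h0 : pvUuidToOrdinal c uuids = pvUuidToOrdinalLoop c E (-1) := rfl
      rw [h0, pv_loopA_char c E (-1) hE0, ← hP, ← hm]
    have hmemm : ∀ x, x ∈ m → x ∈ E ∧ P x = true := fun x hx => List.mem_filter.mp (hm ▸ hx)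
    have hnodupm : m.Nodup := by rw [hm]; exact hnodupE.filter P
    clear_value m
    -- unfold one step of both loops
    simp only [pvLoopA, pvLoopB, ← hlo]
    cases hmm : m with
    | nil =>
      -- no match: both loops break and return rc
      have hfnil : f = [] := by
        have := hpf
        rw [hmm] at this
        exact this.eq_nil
      have hA' : pvUuidToOrdinal c uuids = -1 := by rw [hA, hmm]; rfl
      rw [hA', if_pos (by norm_num : (-1 : Int) < 0)]
      have hcond : lo = n ∨ PySem.Str.startswith (keys.getD lo "") c = false := by
        by_cases h : lo = n
        · exact Or.inl h
        · right
          cases hsw : PySem.Str.startswith (keys.getD lo "") c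
          · rfl
          · exfalso
            have hlon : lo < n := by omega
            have : pairs.getD lo (0, "") ∈ f :=
              List.mem_filter.mpr ⟨hgdmem lo hlon, by
                show PySem.Str.startswith (pairs.getD lo (0, "")).2 c = true
                rw [← keysj lo hlon]; exact hsw⟩
            rw [hfnil] at this
            exact (List.not_mem_nil).elim this
      rw [if_pos hcond]
    | cons p m' =>
      have hfne : f ≠ [] := by
        intro h
        rw [h, hmm] at hpf
        exact absurd hpf.symm.eq_nil (by simp)
      obtain ⟨hlon, hswlo⟩ := Hlo_match hfne
      have hcondF : ¬ (lo = n ∨ PySem.Str.startswith (keys.getD lo "") c = false) := by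
        rintro (h | h)
        · omega
        · rw [hswlo] at h; simp at h
      cases hm' : m' with
      | nil =>
        -- unique match p: both loops take it
        have hfp : f = [p] := by
          have := hpf
          rw [hmm, hm'] at this
          exact List.perm_singleton.mp this
        have hpE : p ∈ E ∧ P p = true := hmemm p (by rw [hmm]; exact List.mem_cons_self)
        have hp0 : (0 : Int) ≤ p.1 := hE0 p hpE.1
        have hA' : pvUuidToOrdinal c uuids = p.1 := by rw [hA, hmm, hm']; simp [pvOrdinalOf]
        rw [hA', if_neg (not_lt.mpr hp0), if_neg hcondF]
        -- position lo carries exactly p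
        have hgdlo : pairs.getD lo (0, "") = p := by
          have : pairs.getD lo (0, "") ∈ f :=
            List.mem_filter.mpr ⟨hgdmem lo hlon, by
              show PySem.Str.startswith (pairs.getD lo (0, "")).2 c = true
              rw [← keysj lo hlon]; exact hswlo⟩
          rw [hfp] at this
          exact List.mem_singleton.mp this
        have hc2 : ¬ (lo + 1 < n ∧ PySem.Str.startswith (keys.getD (lo + 1) "") c = true) := by
          rintro ⟨h1, h2⟩
          have hgdlo1 : pairs.getD (lo + 1) (0, "") = p := by
            have : pairs.getD (lo + 1) (0, "") ∈ f :=
              List.mem_filter.mpr ⟨hgdmem (lo + 1) h1, by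
                show PySem.Str.startswith (pairs.getD (lo + 1) (0, "")).2 c = true
                rw [← keysj (lo + 1) h1]; exact h2⟩
            rw [hfp] at this
            exact List.mem_singleton.mp this
          have hll : lo < pairs.length := by omega
          have hll1 : lo + 1 < pairs.length := by omega
          have : pairs[lo] = pairs[lo + 1] := by
            rw [← List.getD_eq_getElem _ (0, "") hll, ← List.getD_eq_getElem _ (0, "") hll1,
              hgdlo, hgdlo1]
          exact absurd ((hnodup.getElem_inj_iff).mp this) (by omega)
        rw [if_neg hc2, hgdlo]
        by_cases hdup : rc.contains p.1
        · rw [if_pos hdup, if_pos (by rw [PySem.Set.contains_eq_listContains]; exact hdup)]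
        · rw [if_neg hdup, if_neg (by rw [PySem.Set.contains_eq_listContains]; exact hdup)]
          have hadd : PySem.Set.add rc p.1 = rc ++ [p.1] := by
            rw [PySem.Set.add, PySem.Set.contains_eq_listContains, if_neg hdup]
          rw [hadd]
          exact ih (rc ++ [p.1])
      | cons q m'' =>
        -- ambiguous: A returns -1, B sees a second match at lo+1
        have hA' : pvUuidToOrdinal c uuids = -1 := by rw [hA, hmm, hm']; rfl
        rw [hA', if_pos (by norm_num : (-1 : Int) < 0), if_neg hcondF]
        have hpq : p ≠ q := by
          have hnm := hnodupm
          rw [hmm, hm'] at hnm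
          have := (List.nodup_cons.mp hnm).1
          exact fun e => this (e ▸ List.mem_cons_self)
        have hpmem : p ∈ f := hpf.mem_iff.mpr (by rw [hmm]; exact List.mem_cons_self)
        have hqmem : q ∈ f := hpf.mem_iff.mpr
          (by rw [hmm, hm']; exact List.mem_cons_of_mem _ List.mem_cons_self)
        obtain ⟨jp, hjpn, hlojp, hgdp, hPp⟩ := Hpos p hpmem
        obtain ⟨jq, hjqn, hlojq, hgdq, hPq⟩ := Hpos q hqmem
        have hjpq : jp ≠ jq := fun e => hpq (by rw [← hgdp, ← hgdq, e])
        have hc2 : lo + 1 < n ∧ PySem.Str.startswith (keys.getD (lo + 1) "") c = true := by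
          rcases Nat.lt_or_ge lo jp with h | h
          · exact Hsecond jp hjpn h hPp
          · have hjplo : jp = lo := by omega
            have : lo < jq := by omega
            exact Hsecond jq hjqn this hPq
        rw [if_pos hc2]
-- ===== VERDICT (by name: the statement is the Claim_ definition above) =====
theorem transform_uuid_to_ordinals_py_spec : Claim_equal_transform_uuid_to_ordinals_py := by
  intro candidates uuids _
  show _ = _
  simp only [transform_uuid_to_ordinals_py, transform_uuid_to_ordinals_py_alt]
  exact pv_main uuids candidates []
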